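-- pv_equiv track=rewrite | github.com/hemanth-kotagiri/365DS-Py-Programmer-Bootcamp | coins_problem.py | count_heads
-- ===== SOURCE A (Python) =====
-- def count_heads(no_of_coins):
--     # c = [0]*no_of_coins
--
--     # for i in range(1, no_of_coins):
--     #     for j in range(0, no_of_coins, i):
--     #         c[j] = 1 - c[j]
--
--     # return c.count(1)
--
--
--     coins = ['H' for i in range(no_of_coins)]
--     j = 1
--     while j < no_of_coins:
--         for i in range(j, no_of_coins, j+1):
--             if coins[i] == 'H':
--                 coins[i] = 'T'
--             else:
--                 coins[i] = 'H'
--         j += 1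
--
--     return coins.count('H')
-- ===== SOURCE B (Python) =====
-- def count_heads(no_of_coins):
--     # Coin i stays 'H' iff i+1 has an odd number of divisors, i.e. i+1 is a
--     # perfect square, so the answer is the integer square root of no_of_coins.
--     k = 0
--     while (k + 1) * (k + 1) <= no_of_coins:
--         k += 1
--     return k
-- ===== Notes on version B (the rewrite author's own statement) =====
-- stated objective: faster
-- what changed: A simulates every flip of every coin (the classic locker/coin puzzle); B uses the number-theoretic fact that a coin stays heads iff its 1-based position is a perfect square, so it just computes the integer square root of n with a simple incrementing loop.
import Mathlib
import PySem

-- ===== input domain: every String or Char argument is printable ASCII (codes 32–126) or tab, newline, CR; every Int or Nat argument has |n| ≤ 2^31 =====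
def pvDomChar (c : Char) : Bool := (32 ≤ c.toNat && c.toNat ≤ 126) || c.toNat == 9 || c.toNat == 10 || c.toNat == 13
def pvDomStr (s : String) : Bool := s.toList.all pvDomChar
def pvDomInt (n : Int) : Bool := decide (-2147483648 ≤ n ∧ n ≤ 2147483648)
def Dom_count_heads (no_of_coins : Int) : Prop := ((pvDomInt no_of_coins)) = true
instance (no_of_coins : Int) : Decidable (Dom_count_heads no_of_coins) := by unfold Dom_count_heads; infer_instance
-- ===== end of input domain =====

-- B replaces A's full coin-flip simulation by the classical fact that a coin ends
-- heads iff its one-based position is a perfect square: it computes the integer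
-- square root of n by a simple incrementing loop.

-- ===== PORT A =====
-- 'for i in range(j, no_of_coins, j+1): if coins[i]=='H': coins[i]='T' else: coins[i]='H''
-- The mutable Python list is ported as Array (in-place update); coins[i] read/write is
-- ported at index i.toNat via getD/setIfInBounds — exact here, since every index the
-- range produces satisfies 0 ≤ j ≤ i < len(coins), so Python neither wraps nor raises.
def chInner (coins : Array String) (j n : Int) : Array String :=
  (PySem.List.pyRange j n (j + 1)).foldl
    (fun cs i =>
      if cs.getD i.toNat "" = "H" then cs.setIfInBounds i.toNat "T"
      else cs.setIfInBounds i.toNat "H") coins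

-- 'j = 1; while j < no_of_coins: <inner>; j += 1' — fuel = number of remaining iterations
def chLoop : Nat → Array String → Int → Int → Array String
  | 0, coins, _, _ => coins
  | fuel + 1, coins, j, n => if j < n then chLoop fuel (chInner coins j n) (j + 1) n else coins

def count_heads (no_of_coins : Int) : Int :=
  let coins := ((PySem.List.pyRange 0 no_of_coins 1).map (fun _ => "H")).toArray
  let final := chLoop (no_of_coins - 1).toNat coins 1 no_of_coins
  (PySem.List.count final.toList "H" : Int)

-- ===== PORT B =====
-- 'k = 0; while (k+1)*(k+1) <= no_of_coins: k += 1; return k'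
-- (fuel no_of_coins.toNat bounds the number of iterations, which is ⌊√n⌋ ≤ n)
def altLoop : Nat → Int → Int → Int
  | 0, k, _ => k
  | fuel + 1, k, n => if (k + 1) * (k + 1) ≤ n then altLoop fuel (k + 1) n else k

def count_heads_alt (no_of_coins : Int) : Int :=
  altLoop no_of_coins.toNat 0 no_of_coins

-- ===== PRECONDITION & SPEC =====
def Spec_count_heads (no_of_coins : Int) (out : Int) : Prop := out = count_heads_alt no_of_coins
instance (no_of_coins : Int) (out : Int) : Decidable (Spec_count_heads no_of_coins out) := by unfold Spec_count_heads; infer_instance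

-- ===== CLAIM (what is proved, stated in full; the proofs are below) =====
def Claim_equal_count_heads : Prop := ∀ (no_of_coins : Int), Dom_count_heads no_of_coins → Spec_count_heads no_of_coins (count_heads no_of_coins)

-- ===== LEMMAS AND PROOFS =====

-- list-level reformulations of A's loops (proof helpers; the port itself uses Array)
def chInnerL (coins : List String) (j n : Int) : List String :=
  (PySem.List.pyRange j n (j + 1)).foldl
    (fun cs i =>
      if PySem.List.pyGetD cs i "" = "H" then PySem.List.pySetD cs i "T"
      else PySem.List.pySetD cs i "H") coins

def chLoopL : Nat → List String → Int → Int → List String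
  | 0, coins, _, _ => coins
  | fuel + 1, coins, j, n => if j < n then chLoopL fuel (chInnerL coins j n) (j + 1) n else coins

lemma chArr_getD (a : Array String) (i : Nat) (d : String) :
    a.getD i d = a.toList.getD i d := by
  unfold Array.getD
  split <;> rename_i h
  · rw [List.getD_eq_getElem _ _ (by simpa using h)]
    exact (Array.getElem_toList h).symm
  · rw [List.getD_eq_default _ _ (by simpa using h)]

lemma fold_toList : ∀ (idxs : List Int), (∀ i ∈ idxs, 0 ≤ i) → ∀ (cs : Array String),
    (idxs.foldl
      (fun cs i =>
        if cs.getD i.toNat "" = "H" then cs.setIfInBounds i.toNat "T"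
        else cs.setIfInBounds i.toNat "H") cs).toList
    = idxs.foldl
        (fun cs i =>
          if PySem.List.pyGetD cs i "" = "H" then PySem.List.pySetD cs i "T"
          else PySem.List.pySetD cs i "H") cs.toList := by
  intro idxs
  induction idxs with
  | nil => intro _ cs; rfl
  | cons i t ih =>
    intro h0 cs
    have hi0 : 0 ≤ i := h0 i List.mem_cons_self
    have hstep : (if cs.getD i.toNat "" = "H" then cs.setIfInBounds i.toNat "T"
          else cs.setIfInBounds i.toNat "H").toList
        = (if PySem.List.pyGetD cs.toList i "" = "H" then PySem.List.pySetD cs.toList i "T"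
           else PySem.List.pySetD cs.toList i "H") := by
      rw [PySem.List.pyGetD_of_nonneg _ _ hi0, PySem.List.pySetD_of_nonneg _ _ hi0,
          PySem.List.pySetD_of_nonneg _ _ hi0, ← chArr_getD]
      by_cases hc : cs.getD i.toNat "" = "H"
      · rw [if_pos hc, if_pos hc, Array.toList_setIfInBounds]
      · rw [if_neg hc, if_neg hc, Array.toList_setIfInBounds]
    simp only [List.foldl_cons]
    rw [ih (fun x hx => h0 x (List.mem_cons_of_mem i hx)), hstep]

lemma chInner_toList (cs : Array String) {j : Int} (hj : 1 ≤ j) (n : Int) :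
    (chInner cs j n).toList = chInnerL cs.toList j n := by
  unfold chInner chInnerL
  apply fold_toList
  intro i hi
  obtain ⟨h1, -, -⟩ := (PySem.List.mem_pyRange_iff_of_pos (by omega) i).mp hi
  omega

lemma chLoop_toList : ∀ (fuel : Nat) (cs : Array String) (j n : Int), 1 ≤ j →
    (chLoop fuel cs j n).toList = chLoopL fuel cs.toList j n := by
  intro fuel
  induction fuel with
  | zero => intro cs j n _; rfl
  | succ f ih =>
    intro cs j n hj
    show (if j < n then chLoop f (chInner cs j n) (j + 1) n else cs).toList
        = (if j < n then chLoopL f (chInnerL cs.toList j n) (j + 1) n else cs.toList)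
    by_cases h : j < n
    · rw [if_pos h, if_pos h, ih _ _ _ (by omega), chInner_toList cs hj n]
    · rw [if_neg h, if_neg h]


-- number of divisors d of m with 2 ≤ d < j
def chFlips (j m : ℕ) : ℕ := ((Finset.range j).filter (fun d => 2 ≤ d ∧ d ∣ m)).card

-- the coin list when the outer loop variable is j (divisors in [2, j] already processed)
def chState (N j : ℕ) : List String :=
  (List.range N).map (fun i => if Even (chFlips (j + 1) (i + 1)) then "H" else "T")

lemma chFlips_succ (j m : ℕ) :
    chFlips (j + 1) m = chFlips j m + (if 2 ≤ j ∧ j ∣ m then 1 else 0) := by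
  unfold chFlips
  rw [Finset.range_add_one, Finset.filter_insert]
  split_ifs with h
  · rw [Finset.card_insert_of_notMem (by simp)]
  · rfl

-- τ(m) is odd iff m is a perfect square (pairing d ↔ m/d)
lemma card_divisors_odd_iff {m : ℕ} (hm : 0 < m) : Odd m.divisors.card ↔ IsSquare m := by
  have hm' : m ≠ 0 := by omega
  have hsplit : m.divisors.card
      = (m.divisors.filter (fun d => d * d < m)).card
        + ((m.divisors.filter (fun d => d * d = m)).card
            + (m.divisors.filter (fun d => m < d * d)).card) := by
    rw [← Finset.card_filter_add_card_filter_not (s := m.divisors) (fun d => d * d < m)]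
    congr 1
    rw [← Finset.card_filter_add_card_filter_not
          (s := m.divisors.filter (fun d => ¬ d * d < m)) (fun d => d * d = m)]
    rw [Finset.filter_filter, Finset.filter_filter]
    congr 2
    · exact Finset.filter_congr (fun d _ => by omega)
    · exact Finset.filter_congr (fun d _ => by omega)
  have hbij : (m.divisors.filter (fun d => d * d < m)).card
      = (m.divisors.filter (fun d => m < d * d)).card := by
    apply Finset.card_bij' (fun d _ => m / d) (fun e _ => m / e)
    · intro a ha
      obtain ⟨ha1, ha2⟩ := Finset.mem_filter.mp ha
      obtain ⟨hdvd, -⟩ := Nat.mem_divisors.mp ha1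
      have hap : 0 < a := Nat.pos_of_mem_divisors ha1
      have hma : a * (m / a) = m := Nat.mul_div_cancel' hdvd
      have h1 : a < m / a := by nlinarith
      refine Finset.mem_filter.mpr ⟨Nat.mem_divisors.mpr ⟨Nat.div_dvd_of_dvd hdvd, hm'⟩, ?_⟩
      nlinarith
    · intro b hb
      obtain ⟨hb1, hb2⟩ := Finset.mem_filter.mp hb
      obtain ⟨hdvd, -⟩ := Nat.mem_divisors.mp hb1
      have hbp : 0 < b := Nat.pos_of_mem_divisors hb1
      have hmb : b * (m / b) = m := Nat.mul_div_cancel' hdvd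
      have hq : 0 < m / b := Nat.div_pos (Nat.le_of_dvd hm hdvd) hbp
      have h1 : m / b < b := by nlinarith
      refine Finset.mem_filter.mpr ⟨Nat.mem_divisors.mpr ⟨Nat.div_dvd_of_dvd hdvd, hm'⟩, ?_⟩
      nlinarith
    · intro a ha
      obtain ⟨ha1, -⟩ := Finset.mem_filter.mp ha
      exact Nat.div_div_self (Nat.mem_divisors.mp ha1).1 hm'
    · intro b hb
      obtain ⟨hb1, -⟩ := Finset.mem_filter.mp hb
      exact Nat.div_div_self (Nat.mem_divisors.mp hb1).1 hm'
  have hE : (m.divisors.filter (fun d => d * d = m)).card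
      = if IsSquare m then 1 else 0 := by
    by_cases hs : IsSquare m
    · obtain ⟨r, hr⟩ := hs
      rw [if_pos ⟨r, hr⟩]
      have : m.divisors.filter (fun d => d * d = m) = {r} := by
        ext d
        simp only [Finset.mem_filter, Nat.mem_divisors, Finset.mem_singleton]
        constructor
        · rintro ⟨-, hd⟩
          exact Nat.mul_self_inj.mp (by rw [hd, hr])
        · intro hd2
          subst hd2
          exact ⟨⟨⟨d, hr⟩, hm'⟩, hr.symm⟩
      rw [this, Finset.card_singleton]
    · rw [if_neg hs, Finset.card_eq_zero, Finset.filter_eq_empty_iff]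
      intro d _ hd
      exact hs ⟨d, hd.symm⟩
  by_cases hs : IsSquare m
  · rw [if_pos hs] at hE
    constructor
    · intro _; exact hs
    · intro _; rw [Nat.odd_iff]; omega
  · rw [if_neg hs] at hE
    constructor
    · intro h; rw [Nat.odd_iff] at h; omega
    · intro h; exact absurd h hs

-- for 1 ≤ m ≤ N, the divisors of m in [2, N] are all divisors of m except 1
lemma chFlips_total {m N : ℕ} (hm : 0 < m) (hmN : m ≤ N) :
    chFlips (N + 1) m = m.divisors.card - 1 := by
  unfold chFlips
  have hset : (Finset.range (N + 1)).filter (fun d => 2 ≤ d ∧ d ∣ m)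
      = m.divisors.erase 1 := by
    ext d
    simp only [Finset.mem_filter, Finset.mem_range, Finset.mem_erase, Nat.mem_divisors]
    constructor
    · rintro ⟨-, h2, hdvd⟩
      exact ⟨by omega, hdvd, by omega⟩
    · rintro ⟨hne, hdvd, -⟩
      have hdle : d ≤ m := Nat.le_of_dvd hm hdvd
      have hdpos : 0 < d := Nat.pos_of_dvd_of_pos hdvd hm
      exact ⟨by omega, by omega, hdvd⟩
  rw [hset, Finset.card_erase_of_mem (Nat.one_mem_divisors.mpr (by omega))]

lemma even_chFlips_total_iff {m N : ℕ} (hm : 0 < m) (hmN : m ≤ N) :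
    Even (chFlips (N + 1) m) ↔ IsSquare m := by
  have h1 : 1 ≤ m.divisors.card :=
    Finset.card_pos.mpr ⟨1, Nat.one_mem_divisors.mpr (by omega)⟩
  rw [chFlips_total hm hmN, ← card_divisors_odd_iff hm, Nat.even_iff, Nat.odd_iff]
  omega

-- setting one cell of a mapped range
lemma set_map_range {N t : ℕ} (f : ℕ → String) (v : String) (_ht : t < N) :
    ((List.range N).map f).set t v
      = (List.range N).map (fun k => if k = t then v else f k) := by
  apply List.ext_getElem (by simp)
  intro i h1 h2
  simp only [List.length_set, List.length_map, List.length_range] at h1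
  rw [List.getElem_set]
  simp only [List.getElem_map, List.getElem_range]
  split_ifs with h3 h4 h4
  · rfl
  · omega
  · omega
  · rfl

-- generic toggle-fold: folding A's flip step over distinct in-bounds indices
lemma toggle_fold (N : ℕ) (idxs : List ℤ) (f : ℕ → String)
    (hd : idxs.Nodup) (hb : ∀ i ∈ idxs, 0 ≤ i ∧ i < (N : ℤ)) :
    idxs.foldl
      (fun cs i =>
        if PySem.List.pyGetD cs i "" = "H" then PySem.List.pySetD cs i "T"
        else PySem.List.pySetD cs i "H") ((List.range N).map f)
    = (List.range N).map
        (fun (k : ℕ) => if (k : ℤ) ∈ idxs then (if f k = "H" then "T" else "H") else f k) := by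
  induction idxs generalizing f with
  | nil => simp
  | cons i t ih =>
    obtain ⟨hi0, hiN⟩ := hb i List.mem_cons_self
    obtain ⟨hit, htd⟩ := List.nodup_cons.mp hd
    have hitN : i.toNat < N := by omega
    have hget : PySem.List.pyGetD ((List.range N).map f) i "" = f i.toNat := by
      rw [PySem.List.pyGetD_of_nonneg _ _ hi0, PySem.List.getD_map_range f N i.toNat "" hitN]
    have hstep : (if PySem.List.pyGetD ((List.range N).map f) i "" = "H"
          then PySem.List.pySetD ((List.range N).map f) i "T"
          else PySem.List.pySetD ((List.range N).map f) i "H")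
        = (List.range N).map (fun k => if k = i.toNat then (if f k = "H" then "T" else "H") else f k) := by
      rw [hget]
      by_cases hf : f i.toNat = "H"
      · rw [if_pos hf, PySem.List.pySetD_of_nonneg _ _ hi0, set_map_range f "T" hitN]
        apply List.map_congr_left
        intro k _
        by_cases hk : k = i.toNat
        · subst hk; simp [hf]
        · simp [hk]
      · rw [if_neg hf, PySem.List.pySetD_of_nonneg _ _ hi0, set_map_range f "H" hitN]
        apply List.map_congr_left
        intro k _
        by_cases hk : k = i.toNat
        · subst hk; simp [hf]
        · simp [hk]
    simp only [List.foldl_cons, hstep]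
    rw [ih _ htd (fun x hx => hb x (List.mem_cons_of_mem i hx))]
    apply List.map_congr_left
    intro k hk
    have hkN : k < N := List.mem_range.mp hk
    by_cases hki : (k : ℤ) = i
    · have hk' : k = i.toNat := by omega
      have hknt : (k : ℤ) ∉ t := by rw [hki]; exact hit
      rw [if_neg hknt, if_pos hk', if_pos (List.mem_cons.mpr (Or.inl hki))]
    · have hk' : k ≠ i.toNat := by omega
      by_cases hkt : (k : ℤ) ∈ t
      · rw [if_pos hkt, if_neg hk', if_pos (List.mem_cons.mpr (Or.inr hkt))]
      · rw [if_neg hkt, if_neg hk',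
            if_neg (fun hmem => (List.mem_cons.mp hmem).elim hki hkt)]

lemma nodup_pyRange_of_pos (a b : ℤ) {s : ℤ} (hs : 0 < s) :
    (PySem.List.pyRange a b s).Nodup := by
  rw [PySem.List.pyRange_of_pos a b hs]
  refine List.Nodup.map ?_ List.nodup_range
  intro x y hxy
  have hx : a + s * (x : ℤ) = a + s * (y : ℤ) := hxy
  have : (x : ℤ) = (y : ℤ) := by
    have hsx : s * (x : ℤ) = s * (y : ℤ) := by omega
    exact mul_left_cancel₀ (by omega) hsx
  exact_mod_cast this

-- membership in range(J, n, J+1) for 1 ≤ J, on a Nat index k with k < n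
lemma mem_inner_range_iff {J k : ℕ} {n : ℤ} (hJ : 1 ≤ J) (hk : (k : ℤ) < n) :
    ((k : ℤ) ∈ PySem.List.pyRange (J : ℤ) n ((J : ℤ) + 1)) ↔ (J + 1) ∣ (k + 1) := by
  rw [PySem.List.mem_pyRange_iff_of_pos (by omega)]
  constructor
  · rintro ⟨h1, -, hdvd⟩
    have h2 : ((J : ℤ) + 1) ∣ ((k : ℤ) + 1) := by
      have := dvd_add hdvd (dvd_refl ((J : ℤ) + 1))
      simpa [show (k : ℤ) - J + ((J : ℤ) + 1) = (k : ℤ) + 1 by ring] using this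
    rwa [show ((J : ℤ) + 1) = ((J + 1 : ℕ) : ℤ) by push_cast; ring,
         show ((k : ℤ) + 1) = ((k + 1 : ℕ) : ℤ) by push_cast; ring,
         Int.natCast_dvd_natCast] at h2
  · intro hdvd
    have hJk : J + 1 ≤ k + 1 := Nat.le_of_dvd (by omega) hdvd
    have hdvd' : ((J : ℤ) + 1) ∣ ((k : ℤ) + 1) := by
      rw [show ((J : ℤ) + 1) = ((J + 1 : ℕ) : ℤ) by push_cast; ring,
          show ((k : ℤ) + 1) = ((k + 1 : ℕ) : ℤ) by push_cast; ring,
          Int.natCast_dvd_natCast]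
      exact hdvd
    refine ⟨by omega, hk, ?_⟩
    have := dvd_sub hdvd' (dvd_refl ((J : ℤ) + 1))
    simpa [show (k : ℤ) + 1 - ((J : ℤ) + 1) = (k : ℤ) - J by ring] using this

lemma chInner_state {N J : ℕ} {n : ℤ} (hJ : 1 ≤ J) (hn : n = (N : ℤ)) :
    chInnerL (chState N J) (J : ℤ) n = chState N (J + 1) := by
  unfold chInnerL chState
  have hb : ∀ i ∈ PySem.List.pyRange (J : ℤ) n ((J : ℤ) + 1), 0 ≤ i ∧ i < (N : ℤ) := by
    intro i hi
    obtain ⟨h1, h2, -⟩ := (PySem.List.mem_pyRange_iff_of_pos (by omega) i).mp hi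
    constructor <;> omega
  rw [toggle_fold N _ _ (nodup_pyRange_of_pos _ _ (by omega)) hb]
  apply List.map_congr_left
  intro k hk
  have hkN : k < N := List.mem_range.mp hk
  have hmem : ((k : ℤ) ∈ PySem.List.pyRange (J : ℤ) n ((J : ℤ) + 1)) ↔ (J + 1) ∣ (k + 1) :=
    mem_inner_range_iff hJ (by omega)
  have hfs := chFlips_succ (J + 1) (k + 1)
  by_cases hdvd : (J + 1) ∣ (k + 1)
  · rw [if_pos (hmem.mpr hdvd)]
    have hfs' : chFlips (J + 1 + 1) (k + 1) = chFlips (J + 1) (k + 1) + 1 := by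
      rw [hfs, if_pos ⟨by omega, hdvd⟩]
    simp only [hfs', Nat.even_add_one]
    by_cases he : Even (chFlips (J + 1) (k + 1))
    · simp [he]
    · simp [he]
  · rw [if_neg (fun h => hdvd (hmem.mp h))]
    have hfs' : chFlips (J + 1 + 1) (k + 1) = chFlips (J + 1) (k + 1) := by
      rw [hfs, if_neg (by tauto)]
      omega
    simp only [hfs']

lemma chLoop_state {N : ℕ} {n : ℤ} (hn : n = (N : ℤ)) :
    ∀ (fuel J : ℕ), 1 ≤ J → (J : ℤ) + fuel = n →
      chLoopL fuel (chState N J) (J : ℤ) n = chState N (J + fuel) := by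
  intro fuel
  induction fuel with
  | zero => intro J _ _; rfl
  | succ f ih =>
    intro J h1 h2
    have hJn : (J : ℤ) < n := by omega
    show (if (J : ℤ) < n then chLoopL f (chInnerL (chState N J) (J : ℤ) n) ((J : ℤ) + 1) n
          else chState N J) = _
    rw [if_pos hJn, chInner_state h1 hn]
    have hrec := ih (J + 1) (by omega) (by push_cast; omega)
    rw [show ((J : ℤ) + 1) = ((J + 1 : ℕ) : ℤ) by push_cast; ring, hrec]
    congr 1
    omega

lemma sqrt_succ_eq (K : ℕ) :
    Nat.sqrt (K + 1) = Nat.sqrt K + (if IsSquare (K + 1) then 1 else 0) := by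
  by_cases h : IsSquare (K + 1)
  · obtain ⟨r, hr⟩ := h
    obtain ⟨s, rfl⟩ : ∃ s, r = s + 1 := by
      rcases r with _ | s
      · omega
      · exact ⟨s, rfl⟩
    have h1 : Nat.sqrt (K + 1) = s + 1 := by
      have hu : Nat.sqrt (K + 1) < s + 2 := Nat.sqrt_lt.mpr (by nlinarith)
      have hl : s + 1 ≤ Nat.sqrt (K + 1) := Nat.le_sqrt.mpr (by nlinarith)
      omega
    have h2 : Nat.sqrt K = s := by
      have hu : Nat.sqrt K < s + 1 := Nat.sqrt_lt.mpr (by nlinarith)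
      have hl : s ≤ Nat.sqrt K := Nat.le_sqrt.mpr (by nlinarith)
      omega
    rw [h1, h2, if_pos ⟨s + 1, hr⟩]
  · have h2 : Nat.sqrt (K + 1) = Nat.sqrt K := by
      have hub : K + 1 ≤ (Nat.sqrt K + 1) * (Nat.sqrt K + 1) := Nat.lt_succ_sqrt K
      have hne : K + 1 ≠ (Nat.sqrt K + 1) * (Nat.sqrt K + 1) := by
        intro he
        exact h ⟨Nat.sqrt K + 1, by rw [he]⟩
      have hlt : Nat.sqrt (K + 1) < Nat.sqrt K + 1 := Nat.sqrt_lt.mpr (by omega)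
      have hmono := Nat.sqrt_le_sqrt (show K ≤ K + 1 by omega)
      omega
    rw [h2, if_neg h]
    omega

lemma count_squares (K : ℕ) :
    List.count "H" ((List.range K).map (fun i => if IsSquare (i + 1) then "H" else "T"))
      = Nat.sqrt K := by
  induction K with
  | zero => simp
  | succ k ih =>
    rw [List.range_succ, List.map_append, List.count_append, ih, sqrt_succ_eq]
    by_cases h : IsSquare (k + 1) <;> simp [h]

lemma chFlips_one (m : ℕ) : chFlips 2 m = 0 := by
  unfold chFlips
  rw [Finset.card_eq_zero, Finset.filter_eq_empty_iff]
  intro d hd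
  have := Finset.mem_range.mp hd
  omega

-- A computes ⌊√n⌋ for positive n
lemma count_heads_eq_sqrt {n : ℤ} (hn : 0 < n) :
    count_heads n = (Nat.sqrt n.toNat : ℤ) := by
  have hNn : n = (n.toNat : ℤ) := by omega
  have hinit : (PySem.List.pyRange 0 n 1).map (fun _ => "H") = chState n.toNat 1 := by
    rw [PySem.List.pyRange_one, List.map_map]
    unfold chState
    rw [show (n - 0).toNat = n.toNat by omega]
    apply List.map_congr_left
    intro k _
    simp [chFlips_one]
  have hloop := chLoop_state (N := n.toNat) hNn (n - 1).toNat 1 (by omega) (by omega)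
  rw [show ((1 : ℕ) : ℤ) = (1 : ℤ) from rfl] at hloop
  have hfinal : chState n.toNat (1 + (n - 1).toNat)
      = (List.range n.toNat).map (fun i => if IsSquare (i + 1) then "H" else "T") := by
    rw [show 1 + (n - 1).toNat = n.toNat by omega]
    unfold chState
    apply List.map_congr_left
    intro k hk
    have hkN : k < n.toNat := List.mem_range.mp hk
    rw [if_congr (even_chFlips_total_iff (by omega) (by omega)) rfl rfl]
  unfold count_heads
  show ((PySem.List.count
      (chLoop (n - 1).toNat ((PySem.List.pyRange 0 n 1).map (fun _ => "H")).toArray 1 n).toList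
      "H" : ℕ) : ℤ) = (Nat.sqrt n.toNat : ℤ)
  rw [chLoop_toList _ _ _ _ (by omega), List.toList_toArray, hinit, hloop, hfinal,
      PySem.List.count_eq, count_squares]

-- B computes ⌊√n⌋
lemma altLoop_eq_sqrt {N : ℕ} {n : ℤ} (hn : n = (N : ℤ)) :
    ∀ (fuel k : ℕ), k ≤ Nat.sqrt N → Nat.sqrt N ≤ k + fuel →
      altLoop fuel (k : ℤ) n = (Nat.sqrt N : ℤ) := by
  intro fuel
  induction fuel with
  | zero =>
    intro k h1 h2
    show (k : ℤ) = _
    have : k = Nat.sqrt N := by omega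
    rw [this]
  | succ f ih =>
    intro k h1 h2
    show (if ((k : ℤ) + 1) * ((k : ℤ) + 1) ≤ n then altLoop f ((k : ℤ) + 1) n else (k : ℤ)) = _
    by_cases hc : ((k : ℤ) + 1) * ((k : ℤ) + 1) ≤ n
    · rw [if_pos hc]
      have hnat : (k + 1) * (k + 1) ≤ N := by
        have h' : (((k + 1) * (k + 1) : ℕ) : ℤ) ≤ (N : ℤ) := by push_cast; omega
        exact_mod_cast h'
      have hks : k + 1 ≤ Nat.sqrt N := Nat.le_sqrt.mpr hnat
      rw [show ((k : ℤ) + 1) = ((k + 1 : ℕ) : ℤ) by push_cast; ring]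
      exact ih (k + 1) hks (by omega)
    · rw [if_neg hc]
      have hgt : ¬ ((k + 1) * (k + 1) ≤ N) := by
        intro hle
        apply hc
        have h' : (((k + 1) * (k + 1) : ℕ) : ℤ) ≤ (N : ℤ) := by exact_mod_cast hle
        push_cast at h'
        omega
      have hlt : Nat.sqrt N < k + 1 := by
        rcases Nat.lt_or_ge (Nat.sqrt N) (k + 1) with hx | hx
        · exact hx
        · exact absurd (Nat.le_sqrt.mp hx) hgt
      have : k = Nat.sqrt N := by omega
      rw [this]

lemma count_heads_alt_eq_sqrt (n : ℤ) : count_heads_alt n = (Nat.sqrt n.toNat : ℤ) := by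
  by_cases hn : 0 ≤ n
  · exact altLoop_eq_sqrt (N := n.toNat) (by omega) n.toNat 0 (Nat.zero_le _)
      (by simpa using Nat.sqrt_le_self n.toNat)
  · have h0 : n.toNat = 0 := by omega
    unfold count_heads_alt
    rw [h0]
    simp [altLoop]

-- ===== VERDICT (by name: the statement is the Claim_ definition above) =====
theorem count_heads_spec : Claim_equal_count_heads := by
  intro n _
  unfold Spec_count_heads
  rw [count_heads_alt_eq_sqrt]
  by_cases hn : 0 < n
  · exact count_heads_eq_sqrt hn
  · unfold count_heads
    rw [PySem.List.pyRange_one_eq_nil (by omega), show (n - 1).toNat = 0 by omega,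
        show n.toNat = 0 by omega]
    rfl
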